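-- pv_equiv track=rewrite | github.com/ViennaRNA/VIECPLX | src/foldingAlg/beam_search_fold.py | canonical_pairs
-- ===== SOURCE A (Python) =====
-- def canonical_pairs(seq):
--     pairs = [[] for _ in seq]
--     for i, nucleotide in enumerate(seq):
--         for j in range(i+1, len(seq)):
--             if (nucleotide == 'A' and seq[j] == 'U') or \
--                 (nucleotide == 'U' and seq[j] == 'A') or \
--                 (nucleotide == 'G' and seq[j] == 'C') or \
--                 (nucleotide == 'C' and seq[j] == 'G') or \
--                 (nucleotide == 'G' and seq[j] == 'U') or \
--                     (nucleotide == 'U' and seq[j] == 'G'):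
--                 pairs[i].append(j+1)
--     return pairs
-- ===== SOURCE B (Python) =====
-- def canonical_pairs(seq):
--     comp = {'A': 'U', 'U': 'AG', 'G': 'CU', 'C': 'G'}
--     pos = {}
--     for j, ch in enumerate(seq):
--         pos.setdefault(ch, []).append(j)
--     result = []
--     for i, ch in enumerate(seq):
--         cands = []
--         for c in comp.get(ch, ''):
--             cands.extend(pos.get(c, []))
--         cands.sort()
--         result.append([j + 1 for j in cands if j > i])
--     return result
-- ===== Notes on version B (the rewrite author's own statement) =====
-- stated objective: faster
-- what changed: B replaces the nested rescan of all j>i by a one-pass positions-per-letter index; each row is the merged, sorted complement-position lists filtered to j>i, so only actual complement positions are traversed per index.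
import Mathlib
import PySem

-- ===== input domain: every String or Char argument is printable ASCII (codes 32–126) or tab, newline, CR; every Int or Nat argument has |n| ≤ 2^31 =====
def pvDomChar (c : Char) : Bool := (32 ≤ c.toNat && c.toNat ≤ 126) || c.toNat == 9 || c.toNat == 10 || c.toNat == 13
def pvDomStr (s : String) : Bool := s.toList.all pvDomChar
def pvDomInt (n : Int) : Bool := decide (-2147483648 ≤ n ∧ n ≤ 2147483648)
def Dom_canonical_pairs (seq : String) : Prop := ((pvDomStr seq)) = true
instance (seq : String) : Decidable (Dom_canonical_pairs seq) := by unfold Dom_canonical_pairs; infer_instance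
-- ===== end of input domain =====

-- B builds a positions-per-letter index once and reads only complement-position lists per index,
-- instead of rescanning all j > i for every i (measured faster in a timing run).

-- ===== PORT A =====
-- the six-way disjunction of A's if, as a helper
def pairChk (a b : Char) : Bool :=
  (a == 'A' && b == 'U') || (a == 'U' && b == 'A') || (a == 'G' && b == 'C') ||
  (a == 'C' && b == 'G') || (a == 'G' && b == 'U') || (a == 'U' && b == 'G')

def canonical_pairs (seq : String) : List (List Int) :=
  let l := seq.toList
  let pairs : List (List Int) := l.map (fun _ => [])
  (PySem.List.enumerate l).foldl (fun pairs p =>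
    (PySem.List.pyRange (p.1 + 1) (l.length : Int) 1).foldl (fun pairs j =>
      if pairChk p.2 (PySem.List.pyGetD l j ' ') then
        -- pairs[i].append(j+1)  (index i = p.1 is always in range)
        PySem.List.pySetD pairs p.1 (PySem.List.pyGetD pairs p.1 [] ++ [j + 1])
      else pairs) pairs) pairs

-- ===== PORT B =====
def compDict : PySem.Dict Char (List Char) :=
  PySem.Dict.ofList [('A', ['U']), ('U', ['A', 'G']), ('G', ['C', 'U']), ('C', ['G'])]

def canonical_pairs_alt (seq : String) : List (List Int) :=
  let l := seq.toList
  let pos : PySem.Dict Char (List Int) :=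
    (PySem.List.enumerate l).foldl (fun d p => d.modify p.2 [] (· ++ [p.1])) PySem.Dict.empty
  (PySem.List.enumerate l).foldl (fun res p =>
    let cands := (compDict.getD p.2 []).foldl (fun acc c => acc ++ pos.getD c []) []
    let sortedCands := PySem.List.sorted cands (fun x => x) false
    res ++ [(sortedCands.filter (fun j => decide (p.1 < j))).map (fun j => j + 1)]) []

-- ===== PRECONDITION & SPEC =====
def Spec_canonical_pairs (seq : String) (out : List (List Int)) : Prop := out = canonical_pairs_alt seq
instance (seq : String) (out : List (List Int)) : Decidable (Spec_canonical_pairs seq out) := by unfold Spec_canonical_pairs; infer_instance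

-- ===== CLAIM (what is proved, stated in full; the proofs are below) =====
def Claim_equal_canonical_pairs : Prop := ∀ (seq : String), Dom_canonical_pairs seq → Spec_canonical_pairs seq (canonical_pairs seq)

-- ===== LEMMAS AND PROOFS =====

def posOf (l : List Char) (c : Char) : List Int :=
  (PySem.List.pyRange 0 (l.length : Int) 1).filter (fun j => PySem.List.pyGetD l j ' ' == c)

theorem pos_getD (l : List Char) (c : Char) :
    ((PySem.List.enumerate l).foldl (fun d p => d.modify p.2 [] (· ++ [p.1])) PySem.Dict.empty).getD c []
      = posOf l c := by
  have h1 : (PySem.List.enumerate l).foldl (fun d p => d.modify p.2 [] (· ++ [p.1])) PySem.Dict.empty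
      = ((PySem.List.enumerate l).map Prod.swap).foldl (fun d p => d.modify p.1 [] (· ++ [p.2])) PySem.Dict.empty := by
    rw [List.foldl_map]; rfl
  rw [h1, PySem.Dict.getD_foldl_modify_append]
  rw [PySem.List.enumerate_eq_map_pyRange (d := ' ')]
  simp [posOf, List.filter_map, Function.comp_def]

theorem filter_or_perm (xs : List Int) (p q : Int → Bool)
    (h : ∀ x ∈ xs, ¬(p x = true ∧ q x = true)) :
    (xs.filter p ++ xs.filter q).Perm (xs.filter (fun x => p x || q x)) := by
  induction xs with
  | nil => simp
  | cons x xs ih =>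
    have hx := h x (by simp)
    have ih' := ih (fun y hy => h y (by simp [hy]))
    by_cases hp : p x = true
    · have hq : q x = false := by
        cases hq : q x with
        | true => exact absurd ⟨hp, hq⟩ hx
        | false => rfl
      simpa [hp, hq] using ih'.cons x
    · simp only [Bool.not_eq_true] at hp
      by_cases hq : q x = true
      · simp only [List.filter_cons, hp, hq, Bool.false_or, if_true]
        exact List.perm_middle.trans (ih'.cons x)
      · simp only [Bool.not_eq_true] at hq
        simpa [hp, hq] using ih'

theorem posOf_pairwise (l : List Char) (c : Char) : (posOf l c).Pairwise (· < ·) :=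
  (PySem.List.pairwise_lt_pyRange_one 0 (l.length : Int) ).filter _

theorem pairChk_A (b : Char) : pairChk 'A' b = (b == 'U') := by simp [pairChk]
theorem pairChk_U (b : Char) : pairChk 'U' b = (b == 'A' || b == 'G') := by
  simp [pairChk]
theorem pairChk_G (b : Char) : pairChk 'G' b = (b == 'C' || b == 'U') := by
  simp [pairChk]
theorem pairChk_C (b : Char) : pairChk 'C' b = (b == 'G') := by simp [pairChk]
theorem pairChk_none (a b : Char) (h1 : a ≠ 'A') (h2 : a ≠ 'U') (h3 : a ≠ 'G') (h4 : a ≠ 'C') :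
    pairChk a b = false := by simp [pairChk, h1, h2, h3, h4]

theorem compDict_getD (ch : Char) :
    compDict.getD ch [] = if ch = 'A' then ['U'] else if ch = 'U' then ['A','G']
      else if ch = 'G' then ['C','U'] else if ch = 'C' then ['G'] else [] := by
  have hmk : compDict = PySem.Dict.mk [('A', ['U']), ('U', ['A', 'G']), ('G', ['C', 'U']), ('C', ['G'])] := by
    decide
  split_ifs with h1 h2 h3 h4
  · subst h1; decide
  · subst h2; decide
  · subst h3; decide
  · subst h4; decide
  · rw [hmk]
    simp [PySem.Dict.getD, PySem.Dict.get?,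
      Ne.symm h1, Ne.symm h2, Ne.symm h3, Ne.symm h4]

theorem sorted_posOf (l : List Char) (c : Char) :
    PySem.List.sorted (posOf l c) (fun x => x) false = posOf l c :=
  PySem.List.sorted_eq_of_perm_of_pairwise_lt _ _ _ (List.Perm.refl _) (posOf_pairwise l c)

theorem sorted_two (l : List Char) (c1 c2 : Char) (hne : c1 ≠ c2) :
    PySem.List.sorted (posOf l c1 ++ posOf l c2) (fun x => x) false
      = (PySem.List.pyRange 0 (l.length : Int) 1).filter
          (fun j => PySem.List.pyGetD l j ' ' == c1 || PySem.List.pyGetD l j ' ' == c2) := by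
  apply PySem.List.sorted_eq_of_perm_of_pairwise_lt
  · refine (filter_or_perm _ _ _ ?_).symm
    rintro x hx ⟨ha, hb⟩
    exact hne ((beq_iff_eq.1 ha).symm.trans (beq_iff_eq.1 hb))
  · exact (PySem.List.pairwise_lt_pyRange_one 0 (l.length : Int)).filter _

-- the merged, sorted candidate list for letter ch is exactly the ascending list of
-- complement positions, i.e. the range filtered by A's pairing test
theorem sorted_cands (l : List Char) (ch : Char) :
    PySem.List.sorted
      ((compDict.getD ch []).foldl (fun acc c => acc ++
          ((PySem.List.enumerate l).foldl (fun d p => d.modify p.2 [] (· ++ [p.1])) PySem.Dict.empty).getD c []) [])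
      (fun x => x) false
      = (PySem.List.pyRange 0 (l.length : Int) 1).filter
          (fun j => pairChk ch (PySem.List.pyGetD l j ' ')) := by
  simp only [PySem.List.foldl_append_eq_flatMap, List.nil_append, pos_getD, compDict_getD]
  by_cases h1 : ch = 'A'
  · subst h1
    simp only [Char.reduceEq, if_true, reduceIte, List.flatMap_cons, List.flatMap_nil, List.append_nil]
    rw [sorted_posOf]
    simp only [posOf, pairChk_A]
  · by_cases h2 : ch = 'U'
    · subst h2
      simp only [Char.reduceEq, reduceIte, List.flatMap_cons, List.flatMap_nil, List.append_nil]
      rw [sorted_two l 'A' 'G' (by decide)]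
      simp only [pairChk_U]
    · by_cases h3 : ch = 'G'
      · subst h3
        simp only [Char.reduceEq, reduceIte, List.flatMap_cons, List.flatMap_nil, List.append_nil]
        rw [sorted_two l 'C' 'U' (by decide)]
        simp only [pairChk_G]
      · by_cases h4 : ch = 'C'
        · subst h4
          simp only [Char.reduceEq, reduceIte, List.flatMap_cons, List.flatMap_nil, List.append_nil]
          rw [sorted_posOf]
          simp only [posOf, pairChk_C]
        · simp only [h1, h2, h3, h4, if_false, List.flatMap_nil]
          rw [List.filter_congr (fun j _ => by rw [pairChk_none ch _ h1 h2 h3 h4])]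
          simp [PySem.List.sorted]

def rowTail (l : List Char) (i : Int) (ch : Char) : List Int :=
  ((PySem.List.pyRange (i + 1) (l.length : Int) 1).filter
      (fun j => pairChk ch (PySem.List.pyGetD l j ' '))).map (fun j => j + 1)

theorem appendRow (js : List Int) (k : Nat) (pairs : List (List Int)) :
    js.foldl (fun ps j => PySem.List.pySetD ps (k : Int) (PySem.List.pyGetD ps (k : Int) [] ++ [j + 1])) pairs
      = PySem.List.pySetD pairs (k : Int) (PySem.List.pyGetD pairs (k : Int) [] ++ js.map (fun j => j + 1)) := by
  induction js generalizing pairs with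
  | nil =>
    simp only [List.foldl_nil, List.map_nil, List.append_nil, PySem.List.pySetD_natCast,
      PySem.List.pyGetD_natCast]
    by_cases hk : k < pairs.length
    · rw [List.getD_eq_getElem pairs [] hk, List.set_getElem_self]
    · exact (List.set_eq_of_length_le (Nat.le_of_not_lt hk)).symm
  | cons j js ih =>
    rw [List.foldl_cons, ih]
    simp only [PySem.List.pySetD_natCast, PySem.List.pyGetD_natCast]
    by_cases hk : k < pairs.length
    · have hset : ∀ v : List Int, (pairs.set k v).getD k [] = v := by
        intro v; simp [List.getD, hk]
      rw [hset, List.set_set]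
      simp
    · have hid : ∀ v : List Int, pairs.set k v = pairs :=
        fun v => List.set_eq_of_length_le (Nat.le_of_not_lt hk)
      simp only [hid]

def rowStep (l : List Char) (ps : List (List Int)) (p : Int × Char) : List (List Int) :=
  PySem.List.pySetD ps p.1 (PySem.List.pyGetD ps p.1 [] ++ rowTail l p.1 p.2)

theorem length_foldRows (l : List Char) (E : List (Int × Char)) (ps : List (List Int)) :
    (E.foldl (rowStep l) ps).length = ps.length := by
  induction E generalizing ps with
  | nil => rfl
  | cons p E ih => rw [List.foldl_cons, ih]; simp [rowStep, PySem.List.length_pySetD]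

theorem untouched (l : List Char) (E : List (Int × Char)) (ps : List (List Int)) (m : Nat)
    (h : ∀ p ∈ E, 0 ≤ p.1 ∧ p.1 ≠ (m : Int)) :
    PySem.List.pyGetD (E.foldl (rowStep l) ps) (m : Int) [] = PySem.List.pyGetD ps (m : Int) [] := by
  induction E generalizing ps with
  | nil => rfl
  | cons p E ih =>
    rw [List.foldl_cons, ih _ (fun q hq => h q (by simp [hq]))]
    obtain ⟨h0, hne⟩ := h p (by simp)
    simp only [rowStep, PySem.List.pySetD_of_nonneg (h := h0), PySem.List.pyGetD_natCast]
    have : p.1.toNat ≠ m := by omega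
    simp [List.getD, List.getElem?_set_ne this]

theorem foldRows_eq_map (l : List Char) :
    (PySem.List.enumerate l).foldl (rowStep l) (l.map fun _ => ([] : List Int))
      = (PySem.List.enumerate l).map (fun p => rowTail l p.1 p.2) := by
  apply List.ext_getElem
  · simp [length_foldRows, PySem.List.length_enumerate]
  intro k hk hk'
  have hkl : k < l.length := by
    simpa [length_foldRows] using hk
  have hsplit : PySem.List.enumerate l
      = PySem.List.enumerate (l.take k) ++ ((k : Int), l[k]) :: PySem.List.enumerate (l.drop (k + 1)) ((k : Int) + 1) := by
    conv_lhs => rw [← List.take_append_drop k l]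
    rw [PySem.List.enumerate_append]
    congr 1
    · rw [← List.getElem_cons_drop hkl, PySem.List.enumerate_cons]
      congr 2 <;> simp [List.length_take, Nat.min_eq_left (Nat.le_of_lt hkl)]
  rw [← List.getD_eq_getElem _ ([] : List Int) hk, ← List.getD_eq_getElem _ ([] : List Int) hk']
  rw [hsplit, List.foldl_append, List.foldl_cons]
  -- untouched by the later iterations (their indices are > k)
  have h2 : ∀ p ∈ PySem.List.enumerate (l.drop (k + 1)) ((k : Int) + 1), 0 ≤ p.1 ∧ p.1 ≠ (k : Int) := by
    intro p hp
    obtain ⟨k', hk', rfl⟩ := (PySem.List.mem_enumerate_iff _ _ _).1 hp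
    constructor <;> omega
  have h1 : ∀ p ∈ PySem.List.enumerate (l.take k), 0 ≤ p.1 ∧ p.1 ≠ (k : Int) := by
    intro p hp
    obtain ⟨k', hk', rfl⟩ := (PySem.List.mem_enumerate_iff _ _ _).1 hp
    have : k' < k := by
      have := hk'.trans_le (l.length_take_le k)
      omega
    constructor <;> omega
  have hgetD : ∀ (xs : List (List Int)) (m : Nat), xs.getD m [] = PySem.List.pyGetD xs (m : Int) [] := by
    intro xs m; simp
  rw [hgetD, untouched l _ _ _ h2]
  set X := (PySem.List.enumerate (l.take k)).foldl (rowStep l) (l.map fun _ => ([] : List Int)) with hX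
  have hXlen : X.length = l.length := by simp [hX, length_foldRows]
  have hXk : PySem.List.pyGetD X (k : Int) [] = [] := by
    rw [hX, untouched l _ _ _ h1]
    simp [List.getD]
  rw [rowStep, hXk, PySem.List.pySetD_natCast, PySem.List.pyGetD_natCast, List.nil_append]
  have : k < X.length := by omega
  rw [List.getD_eq_getElem _ _ (by simpa using this), List.getElem_set_self]
  rw [List.map_append, List.map_cons]
  have hlen1 : ((PySem.List.enumerate (l.take k)).map (fun p => rowTail l p.1 p.2)).length = k := by
    simp [PySem.List.length_enumerate, Nat.min_eq_left hkl.le]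
  simp [List.getD, hlen1]

theorem A_eq_map (seq : String) :
    canonical_pairs seq = (PySem.List.enumerate seq.toList).map (fun p => rowTail seq.toList p.1 p.2) := by
  show (PySem.List.enumerate seq.toList).foldl _ _ = _
  refine Eq.trans (PySem.List.foldl_congr_mem _ _ (rowStep seq.toList) _ ?_) (foldRows_eq_map seq.toList)
  intro acc p hp
  obtain ⟨k, hk, rfl⟩ := (PySem.List.mem_enumerate_iff _ _ _).1 hp
  rw [PySem.List.foldl_if_eq_foldl_filter]
  simp only [Int.zero_add]
  rw [appendRow]
  rfl

theorem filter_gt (P : Int → Bool) (nn : Int) (k : Nat) :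
    ((PySem.List.pyRange 0 nn 1).filter P).filter (fun j => decide ((k : Int) < j))
      = (PySem.List.pyRange ((k : Int) + 1) nn 1).filter P := by
  rw [List.filter_filter]
  by_cases h : (k : Int) + 1 ≤ nn
  · rw [PySem.List.pyRange_one_append 0 ((k : Int) + 1) nn (by omega) h, List.filter_append]
    have h1 : (PySem.List.pyRange 0 ((k : Int) + 1) 1).filter
        (fun j => decide ((k : Int) < j) && P j) = [] := by
      apply List.filter_eq_nil_iff.2
      intro j hj
      have := (PySem.List.mem_pyRange_one).1 hj
      simp only [Bool.and_eq_true, decide_eq_true_eq, not_and]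
      intro hkj; omega
    rw [h1, List.nil_append]
    apply List.filter_congr
    intro j hj
    have := (PySem.List.mem_pyRange_one).1 hj
    have : decide ((k : Int) < j) = true := by simp; omega
    rw [this, Bool.true_and]
  · rw [PySem.List.pyRange_one_eq_nil (a := ((k : Int) + 1)) (by omega), List.filter_nil]
    apply List.filter_eq_nil_iff.2
    intro j hj
    have := (PySem.List.mem_pyRange_one).1 hj
    simp only [Bool.and_eq_true, decide_eq_true_eq, not_and]
    intro hkj; omega

theorem B_eq_map (seq : String) :
    canonical_pairs_alt seq = (PySem.List.enumerate seq.toList).map (fun p =>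
      (((PySem.List.pyRange 0 (seq.toList.length : Int) 1).filter
          (fun j => pairChk p.2 (PySem.List.pyGetD seq.toList j ' '))).filter
        (fun j => decide (p.1 < j))).map (fun j => j + 1)) := by
  show (PySem.List.enumerate seq.toList).foldl _ _ = _
  rw [PySem.List.foldl_append_singleton_eq_map]
  rw [List.nil_append]
  apply List.map_congr_left
  intro p hp
  rw [sorted_cands]

-- ===== VERDICT (by name: the statement is the Claim_ definition above) =====
theorem canonical_pairs_spec : Claim_equal_canonical_pairs := by
  intro seq _
  unfold Spec_canonical_pairs
  rw [A_eq_map, B_eq_map]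
  apply List.map_congr_left
  intro p hp
  obtain ⟨k, hk, rfl⟩ := (PySem.List.mem_enumerate_iff _ _ _).1 hp
  simp only [Int.zero_add]
  rw [filter_gt]
  rfl
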